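-- pv_equiv track=rewrite | github.com/cam4ani/PhD-AnimalWelfare | old/UTILS-.py | stats_chaoticmvt
-- ===== SOURCE A (Python) =====
-- def stats_chaoticmvt(li):
--     li = [i for i in li if i[0]!=None]
--     dico_z_lidur = {}
--     for z,d in li:
--         t = 'chatoicmvt_Middle'+str(z)
--         if t not in dico_z_lidur:
--             dico_z_lidur[t] = []
--         dico_z_lidur[t].append(d)
--     return dico_z_lidur
-- ===== SOURCE B (Python) =====
-- def stats_chaoticmvt(li):
--     items = [('chatoicmvt_Middle' + str(z), d) for z, d in li if z is not None]
--     return {t: [d for u, d in items if u == t]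
--             for t in dict.fromkeys(u for u, _ in items)}
-- ===== Notes on version B (the rewrite author's own statement) =====
-- stated objective: alternative
-- what changed: Replaces A's single-pass dict-append grouping by a dict-free decomposition: compute the keyed (key, duration) list once, dedup the keys in first-occurrence order, then build each group with one filter pass per distinct key.
import Mathlib
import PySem

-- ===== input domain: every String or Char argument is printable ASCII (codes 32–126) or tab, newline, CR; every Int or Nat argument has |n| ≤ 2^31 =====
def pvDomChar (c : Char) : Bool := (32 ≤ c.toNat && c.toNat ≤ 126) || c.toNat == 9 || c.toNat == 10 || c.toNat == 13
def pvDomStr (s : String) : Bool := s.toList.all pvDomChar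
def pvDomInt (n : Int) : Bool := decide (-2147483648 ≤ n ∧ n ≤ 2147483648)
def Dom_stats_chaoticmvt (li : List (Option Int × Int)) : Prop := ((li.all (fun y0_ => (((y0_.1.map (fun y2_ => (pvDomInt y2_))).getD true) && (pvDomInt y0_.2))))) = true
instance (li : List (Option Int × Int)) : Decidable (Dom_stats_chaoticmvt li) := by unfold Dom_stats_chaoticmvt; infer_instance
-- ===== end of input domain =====

-- B replaces A's one-pass dict-append grouping by a dict-free decomposition: key each entry once,
-- dedup the keys, then collect each group by one filter pass per distinct key (alternative, not faster).

-- ===== PORT A =====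
def stats_chaoticmvt (li : List (Option Int × Int)) : List (String × List Int) :=
  -- li = [i for i in li if i[0] != None]
  let li2 := li.filter (fun i => decide (i.1 ≠ none))
  -- for z,d in li: t = 'chatoicmvt_Middle'+str(z); if t not in dico: dico[t]=[]; dico[t].append(d)
  let dico := li2.foldl (fun dico p =>
    match p.1 with
    | none => dico   -- unreachable: li2 is filtered
    | some z =>
      let t := "chatoicmvt_Middle" ++ PySem.Int.toStr z
      let dico := if dico.contains t = false then dico.insert t ([] : List Int) else dico
      dico.modify t [] (fun l => l ++ [p.2])) (PySem.Dict.empty : PySem.Dict String (List Int))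
  dico.items

-- ===== PORT B =====
def stats_chaoticmvt_alt (li : List (Option Int × Int)) : List (String × List Int) :=
  -- items = [('chatoicmvt_Middle'+str(z), d) for z, d in li if z is not None]
  let items := li.filterMap (fun p => p.1.map (fun z => ("chatoicmvt_Middle" ++ PySem.Int.toStr z, p.2)))
  -- {t: [d for u, d in items if u == t] for t in dict.fromkeys(u for u, _ in items)}
  (PySem.List.dedup (items.map (fun q => q.1))).map (fun t =>
    (t, (items.filter (fun q => q.1 == t)).map (fun q => q.2)))

-- ===== PRECONDITION & SPEC =====
def Spec_stats_chaoticmvt (li : List (Option Int × Int)) (out : List (String × List Int)) : Prop := out = stats_chaoticmvt_alt li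
instance (li : List (Option Int × Int)) (out : List (String × List Int)) : Decidable (Spec_stats_chaoticmvt li out) := by unfold Spec_stats_chaoticmvt; infer_instance

-- ===== CLAIM (what is proved, stated in full; the proofs are below) =====
def Claim_equal_stats_chaoticmvt : Prop := ∀ (li : List (Option Int × Int)), Dom_stats_chaoticmvt li → Spec_stats_chaoticmvt li (stats_chaoticmvt li)

-- ===== LEMMAS AND PROOFS =====

-- A's "insert [] if absent, then append" is one modify with default [].
theorem pv_step_eq (d : PySem.Dict String (List Int)) (t : String) (x : Int) :
    ((if d.contains t = false then d.insert t ([] : List Int) else d).modify t [] (fun l => l ++ [x]))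
      = d.modify t [] (fun l => l ++ [x]) := by
  by_cases h : d.contains t = false
  · simp only [h, if_pos, PySem.Dict.modify, PySem.Dict.getD_insert_self,
      PySem.Dict.insert_insert_self, PySem.Dict.getD_of_not_contains d ([] : List Int) h]
  · simp only [h]
    simp

-- A's filtered fold is the plain modify-fold over B's keyed items list.
theorem pv_fold_eq (li : List (Option Int × Int)) (d : PySem.Dict String (List Int)) :
    (li.filter (fun i => decide (i.1 ≠ none))).foldl (fun dico p =>
      match p.1 with
      | none => dico
      | some z =>
        let t := "chatoicmvt_Middle" ++ PySem.Int.toStr z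
        let dico := if dico.contains t = false then dico.insert t ([] : List Int) else dico
        dico.modify t [] (fun l => l ++ [p.2])) d
    = (li.filterMap (fun p => p.1.map (fun z => ("chatoicmvt_Middle" ++ PySem.Int.toStr z, p.2)))).foldl
        (fun dico q => dico.modify q.1 [] (fun l => l ++ [q.2])) d := by
  induction li generalizing d with
  | nil => rfl
  | cons p rest ih =>
    obtain ⟨pz, pd⟩ := p
    cases pz with
    | none => simpa using ih d
    | some z =>
      simp only [List.filter_cons, List.filterMap_cons, Option.map_some, ne_eq,
        reduceCtorEq, not_false_eq_true, decide_true, reduceIte, List.foldl_cons]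
      rw [pv_step_eq]
      exact ih _

-- ===== VERDICT (by name: the statement is the Claim_ definition above) =====
theorem stats_chaoticmvt_spec : Claim_equal_stats_chaoticmvt := by
  intro li _
  unfold Spec_stats_chaoticmvt stats_chaoticmvt stats_chaoticmvt_alt
  simp only []
  rw [pv_fold_eq]
  set items := li.filterMap (fun p => p.1.map (fun z => ("chatoicmvt_Middle" ++ PySem.Int.toStr z, p.2))) with hitems
  have hnd : ((items.foldl (fun dico q => dico.modify q.1 [] (fun l => l ++ [q.2]))
      (PySem.Dict.empty : PySem.Dict String (List Int))).keys).Nodup :=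
    PySem.Dict.nodup_keys_foldl_modify_key items Prod.fst [] (fun _ q l => l ++ [q.2]) _
      PySem.Dict.nodup_keys_empty
  rw [PySem.Dict.items_eq_map_keys _ hnd ([] : List Int)]
  rw [PySem.Dict.keys_foldl_modify_key items Prod.fst ([] : List Int) (fun _ q l => l ++ [q.2])]
  have hkeys : PySem.Set.update (PySem.Dict.empty : PySem.Dict String (List Int)).keys (items.map Prod.fst)
      = PySem.List.dedup (items.map (fun q => q.1)) := by
    simp [PySem.Dict.keys, PySem.Dict.empty, PySem.Set.update_nil_left]
  rw [hkeys]
  apply List.map_congr_left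
  intro k _
  rw [PySem.Dict.getD_foldl_modify_append]
  simp [PySem.Dict.getD_empty]
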